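-- pv_equiv track=rewrite | github.com/anug1/ECS260_data_gathering_processing | gather_metrics_inbatches.py | monthly_timeseries
-- ===== SOURCE A (Python) =====
-- from collections import defaultdict
--
-- def monthly_timeseries(commit_dates):
--     if commit_dates is None:
--         return None
--     counts = defaultdict(int)
--
--     for d in commit_dates:
--         month = d[:7]  # YYYY-MM
--         counts[month] += 1
--
--     return dict(sorted(counts.items()))
-- ===== SOURCE B (Python) =====
-- from itertools import groupby
--
-- def monthly_timeseries(commit_dates):
--     if commit_dates is None:
--         return None
--     result = {}
--     for month, grp in groupby(sorted(commit_dates), key=lambda d: d[:7]):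
--         result[month] = sum(1 for _ in grp)
--     return result
-- ===== Notes on version B (the rewrite author's own statement) =====
-- stated objective: alternative
-- what changed: Replaces the defaultdict counting pass followed by sorting the (month, count) items with sorting the dates once and counting adjacent runs via itertools.groupby on the YYYY-MM prefix, so no dict of counters and no sort of tuples is needed.
import Mathlib
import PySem

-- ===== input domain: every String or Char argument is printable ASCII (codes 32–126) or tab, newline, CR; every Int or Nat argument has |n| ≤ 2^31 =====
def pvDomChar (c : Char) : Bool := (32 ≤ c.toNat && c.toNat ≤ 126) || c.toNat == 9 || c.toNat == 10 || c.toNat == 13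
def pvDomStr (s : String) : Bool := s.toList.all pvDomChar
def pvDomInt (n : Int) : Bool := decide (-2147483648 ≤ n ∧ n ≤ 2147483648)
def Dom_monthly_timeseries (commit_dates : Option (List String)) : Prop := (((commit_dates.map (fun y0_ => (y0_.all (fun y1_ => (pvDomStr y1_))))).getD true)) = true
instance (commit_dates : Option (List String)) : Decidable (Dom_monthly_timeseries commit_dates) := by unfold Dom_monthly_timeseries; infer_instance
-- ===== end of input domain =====

-- B replaces A's defaultdict-count-then-sort-the-items with sort-the-dates-once and
-- count adjacent runs grouped by the YYYY-MM prefix (itertools.groupby); alternative decomposition, same results.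

-- ===== PORT A =====
def monthly_timeseries (commit_dates : Option (List String)) : Option (List (String × Int)) :=
  match commit_dates with
  | none => none
  | some ds =>
    let counts := ds.foldl
      (fun counts d => counts.modify (PySem.Str.slice d none (some 7)) (0 : Int) (· + 1))
      PySem.Dict.empty
    some (PySem.List.sorted2 counts.items (fun p => p.1) (fun p => p.2) false)

-- ===== PORT B =====
-- the groupby key lambda d: d[:7]
def pvMonthKey (d : String) : String := PySem.Str.slice d none (some 7)

-- itertools.groupby over an already sorted list: each adjacent run of equal keys
-- becomes one (key, run length) pair
def pvGroupMonths : List String → List (String × Int)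
  | [] => []
  | x :: xs =>
    let m := pvMonthKey x
    (m, ((xs.takeWhile (fun y => pvMonthKey y == m)).length : Int) + 1) ::
      pvGroupMonths (xs.dropWhile (fun y => pvMonthKey y == m))
termination_by l => l.length
decreasing_by
  simpa using Nat.lt_succ_of_le (List.length_dropWhile_le _ xs)

def monthly_timeseries_alt (commit_dates : Option (List String)) : Option (List (String × Int)) :=
  match commit_dates with
  | none => none
  | some ds => some (pvGroupMonths (PySem.List.sorted ds (fun d => d) false))

-- ===== PRECONDITION & SPEC =====
def Spec_monthly_timeseries (commit_dates : Option (List String)) (out : Option (List (String × Int))) : Prop := out = monthly_timeseries_alt commit_dates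
instance (commit_dates : Option (List String)) (out : Option (List (String × Int))) : Decidable (Spec_monthly_timeseries commit_dates out) := by unfold Spec_monthly_timeseries; infer_instance

-- ===== CLAIM (what is proved, stated in full; the proofs are below) =====
def Claim_equal_monthly_timeseries : Prop := ∀ (commit_dates : Option (List String)), Dom_monthly_timeseries commit_dates → Spec_monthly_timeseries commit_dates (monthly_timeseries commit_dates)

-- ===== LEMMAS AND PROOFS =====

-- taking a prefix is monotone for lexicographic order on lists
theorem pv_lex_take {a b : List Char} (h : List.Lex (· < ·) a b) (n : Nat) :
    List.Lex (· < ·) (a.take n) (b.take n) ∨ a.take n = b.take n := by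
  induction h generalizing n with
  | nil =>
    cases n with
    | zero => exact Or.inr rfl
    | succ n => exact Or.inl List.Lex.nil
  | @rel a as b bs hab =>
    cases n with
    | zero => exact Or.inr rfl
    | succ n => exact Or.inl (List.Lex.rel hab)
  | @cons a as bs hl ih =>
    cases n with
    | zero => exact Or.inr rfl
    | succ n =>
      rcases ih n with h' | h'
      · exact Or.inl (List.Lex.cons h')
      · exact Or.inr (by simp [h'])

theorem pvMonthKey_toList (d : String) : (pvMonthKey d).toList = d.toList.take 7 := by
  simp [pvMonthKey, PySem.Str.toList_slice, PySem.List.slice_to d.toList (by norm_num : (0:Int) ≤ 7)]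

theorem pvMonthKey_mono {a b : String} (h : a ≤ b) : pvMonthKey a ≤ pvMonthKey b := by
  rcases lt_or_eq_of_le h with h | h
  · rcases pv_lex_take (String.lt_iff_toList_lt.mp h) 7 with h' | h'
    · exact le_of_lt (String.lt_iff_toList_lt.mpr (by rw [pvMonthKey_toList, pvMonthKey_toList]; exact h'))
    · exact le_of_eq (String.toList_inj.mp (by rw [pvMonthKey_toList, pvMonthKey_toList]; exact h'))
  · exact le_of_eq (by rw [h])

-- insertion with two comparison predicates that agree on the relevant pairs
theorem pv_insertBy_congr {α : Type} (b₁ b₂ : α → α → Bool) (x : α) (ys : List α)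
    (h : ∀ y ∈ ys, b₁ x y = b₂ x y) :
    PySem.List.insertBy b₁ x ys = PySem.List.insertBy b₂ x ys := by
  induction ys with
  | nil => rfl
  | cons y ys ih =>
    simp only [PySem.List.insertBy]
    rw [h y (List.mem_cons_self)]
    split
    · rfl
    · rw [ih (fun z hz => h z (List.mem_cons_of_mem _ hz))]

theorem pv_foldl_insertBy_congr {α : Type} (b₁ b₂ : α → α → Bool) (xs acc : List α)
    (hacc : ∀ x ∈ xs, ∀ y ∈ acc, b₁ x y = b₂ x y)
    (hxs : List.Pairwise (fun a b => b₁ b a = b₂ b a) xs) :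
    xs.foldl (fun acc x => PySem.List.insertBy b₁ x acc) acc
      = xs.foldl (fun acc x => PySem.List.insertBy b₂ x acc) acc := by
  induction xs generalizing acc with
  | nil => rfl
  | cons x xs ih =>
    simp only [List.foldl_cons]
    rw [pv_insertBy_congr b₁ b₂ x acc (hacc x List.mem_cons_self)]
    exact ih _ (fun x' hx' y hy => by
      rcases (PySem.List.insertBy_mem_iff b₂ x y acc).mp hy with rfl | hy
      · exact (List.pairwise_cons.mp hxs).1 x' hx'
      · exact hacc x' (List.mem_cons_of_mem _ hx') y hy) (List.pairwise_cons.mp hxs).2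

-- sorting pairs with pairwise-distinct first components: the tuple comparison is the key comparison
theorem pv_sorted2_eq_sorted_fst (L : List (String × Int))
    (hL : L.Pairwise (fun a b => a.1 ≠ b.1)) :
    PySem.List.sorted2 L (fun p => p.1) (fun p => p.2) false
      = PySem.List.sorted L (fun p => p.1) false := by
  rw [PySem.List.sorted_eq_foldl_insertBy]
  show L.foldl (fun acc x => PySem.List.insertBy _ x acc) [] = _
  apply pv_foldl_insertBy_congr
  · intro _ _ _ h; simp at h
  · refine hL.imp ?_
    intro a b hne
    by_cases h : b.1 < a.1
    · simp [h]
    · have h' : a.1 < b.1 := lt_of_le_of_ne (not_lt.mp h) hne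
      simp [h, h']

-- set(xs) (first occurrences in order) is a sublist of xs
theorem pv_ofList_sublist {α : Type} [BEq α] [LawfulBEq α] (xs : List α) :
    (PySem.Set.ofList xs).Sublist xs := by
  induction xs with
  | nil => simp [PySem.Set.ofList, PySem.Set.empty]
  | cons x xs ih =>
    rw [PySem.Set.ofList_cons]
    exact List.Sublist.cons₂ x ((List.filter_sublist (l := PySem.Set.ofList xs)).trans ih)

theorem pv_discard_replicate_append {α : Type} [BEq α] [LawfulBEq α] (m : α) (k : Nat)
    (rest : List α) (hm : m ∉ rest) :
    PySem.Set.discard (PySem.Set.ofList (List.replicate k m ++ rest)) m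
      = PySem.Set.ofList rest := by
  induction k with
  | zero =>
    simp only [List.replicate, List.nil_append]
    unfold PySem.Set.discard
    apply List.filter_eq_self.mpr
    intro y hy
    have : y ∈ rest := (PySem.Set.mem_ofList rest y).mp hy
    simp; rintro rfl; exact hm this
  | succ k ih =>
    rw [List.replicate_succ, List.cons_append, PySem.Set.ofList_cons]
    unfold PySem.Set.discard
    rw [List.filter_cons]
    simp only [beq_self_eq_true, Bool.not_true]
    rw [List.filter_filter]
    simp only [Bool.and_self]
    exact ih

-- the grouping pass over a month-sorted list produces each month once, with its multiplicity
set_option maxHeartbeats 1000000 in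
theorem pv_group_eq (ss : List String)
    (h : (ss.map pvMonthKey).Pairwise (· ≤ ·)) :
    pvGroupMonths ss
      = (PySem.Set.ofList (ss.map pvMonthKey)).map
          (fun k => (k, ((ss.map pvMonthKey).count k : Int))) := by
  revert h
  fun_induction pvGroupMonths ss with
  | case1 => intro _; rfl
  | case2 x xs m ih =>
    intro h
    rw [List.map_cons] at h
    set run := xs.takeWhile (fun y => pvMonthKey y == m) with hrun
    set rest := xs.dropWhile (fun y => pvMonthKey y == m) with hrest
    have hsplit : run ++ rest = xs := List.takeWhile_append_dropWhile
    have hrunmap : run.map pvMonthKey = List.replicate run.length m := by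
      rw [List.eq_replicate_iff]
      refine ⟨by simp, ?_⟩
      intro b hb
      rcases List.mem_map.mp hb with ⟨y, hy, rfl⟩
      exact eq_of_beq (List.mem_takeWhile_imp (p := fun y => pvMonthKey y == m) (hrun ▸ hy))
    have hle : ∀ y ∈ xs, m ≤ pvMonthKey y := by
      intro y hy
      exact (List.pairwise_cons.mp h).1 (pvMonthKey y) (List.mem_map_of_mem hy)
    have hpairrest : (rest.map pvMonthKey).Pairwise (· ≤ ·) := by
      refine List.Pairwise.sublist ?_ (List.pairwise_cons.mp h).2
      exact (hrest ▸ List.dropWhile_sublist _).map pvMonthKey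
    have hrestlt : ∀ y ∈ rest, m < pvMonthKey y := by
      cases hr : rest with
      | nil => simp
      | cons r rs =>
        have hr0ne : pvMonthKey r ≠ m := by
          have := List.head?_dropWhile_not (fun y => pvMonthKey y == m) xs
          rw [← hrest, hr] at this; simpa using this
        have hrx : ∀ y ∈ rest, y ∈ xs := fun y hy =>
          (List.dropWhile_sublist _).mem (hrest ▸ hy)
        have hmr : m < pvMonthKey r :=
          lt_of_le_of_ne (hle r (hrx r (hr ▸ List.mem_cons_self))) (Ne.symm hr0ne)
        intro y hy
        rcases List.mem_cons.mp hy with rfl | hy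
        · exact hmr
        · refine lt_of_lt_of_le hmr ?_
          have hpr := hpairrest
          rw [hr, List.map_cons, List.pairwise_cons] at hpr
          exact hpr.1 (pvMonthKey y) (List.mem_map_of_mem hy)
    have hmnotin : m ∉ rest.map pvMonthKey := by
      intro hmem
      rcases List.mem_map.mp hmem with ⟨y, hy, heq⟩
      exact absurd heq.symm (ne_of_lt (hrestlt y hy))
    have hmap : (x :: xs).map pvMonthKey
        = m :: (List.replicate run.length m ++ rest.map pvMonthKey) := by
      rw [List.map_cons, ← hsplit, List.map_append, hrunmap]
    rw [hmap, PySem.Set.ofList_cons, pv_discard_replicate_append m _ _ hmnotin, List.map_cons]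
    congr 1
    · have hcm : (m :: (List.replicate run.length m ++ rest.map pvMonthKey)).count m
          = run.length + 1 := by
        simp [List.count_append, List.count_eq_zero_of_not_mem hmnotin]
      rw [hcm]
      simp only [Prod.mk.injEq, true_and]
      push_cast; ring
    · rw [ih hpairrest]
      apply List.map_congr_left
      intro k hk
      have hkrest : k ∈ rest.map pvMonthKey := (PySem.Set.mem_ofList _ _).mp hk
      have hkne : k ≠ m := by rintro rfl; exact hmnotin hkrest
      have : (m :: (List.replicate run.length m ++ rest.map pvMonthKey)).count k
          = (rest.map pvMonthKey).count k := by
        have hkne' : ¬ (m = k) := fun e => hkne e.symm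
        simp [List.count_append, List.count_replicate, hkne']
      rw [this]

-- ===== VERDICT (by name: the statement is the Claim_ definition above) =====
theorem monthly_timeseries_spec : Claim_equal_monthly_timeseries := by
  intro cds _
  unfold Spec_monthly_timeseries monthly_timeseries monthly_timeseries_alt
  cases cds with
  | none => rfl
  | some ds =>
    simp only [Option.some.injEq]
    have hfold : ds.foldl
        (fun counts d => counts.modify (PySem.Str.slice d none (some 7)) (0 : Int) (· + 1))
        PySem.Dict.empty = PySem.Dict.counter (ds.map pvMonthKey) := by
      rw [PySem.Dict.counter_eq_foldl, List.foldl_map]; rfl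
    rw [hfold, PySem.Dict.items_counter]
    set ms' := ds.map pvMonthKey with hms'
    set ss := PySem.List.sorted ds (fun d => d) false with hss
    have hperm : (ss.map pvMonthKey).Perm ms' :=
      (PySem.List.sorted_perm ds (fun d => d) false).map pvMonthKey
    have hpair : (ss.map pvMonthKey).Pairwise (· ≤ ·) :=
      List.pairwise_map.mpr ((PySem.List.sorted_pairwise ds (fun d => d)).imp pvMonthKey_mono)
    have hcnt : (fun k => (k, ((ss.map pvMonthKey).count k : Int)))
        = (fun k => (k, (ms'.count k : Int))) := by
      funext k; rw [hperm.count_eq]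
    rw [pv_sorted2_eq_sorted_fst ((PySem.Set.ofList ms').map (fun k => (k, (ms'.count k : Int)))) (by
      refine List.pairwise_map.mpr ?_
      exact (PySem.Set.nodup_ofList ms').imp (fun h => h))]
    rw [pv_group_eq ss hpair, hcnt]
    refine (PySem.List.sorted_eq_of_perm_of_pairwise_lt
      ((PySem.Set.ofList ms').map (fun k => (k, (ms'.count k : Int))))
      ((PySem.Set.ofList (ss.map pvMonthKey)).map (fun k => (k, (ms'.count k : Int))))
      (fun p => p.1) ?_ ?_)
    · exact ((List.perm_ext_iff_of_nodup (PySem.Set.nodup_ofList _)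
        (PySem.Set.nodup_ofList _)).mpr (fun a => by
          rw [PySem.Set.mem_ofList, PySem.Set.mem_ofList, hperm.mem_iff])).map _
    · refine List.pairwise_map.mpr ?_
      have hle : (PySem.Set.ofList (ss.map pvMonthKey)).Pairwise (· ≤ ·) :=
        hpair.sublist (pv_ofList_sublist _)
      have hne := PySem.Set.nodup_ofList (ss.map pvMonthKey)
      exact (hle.and hne).imp (fun ⟨h1, h2⟩ => lt_of_le_of_ne h1 h2)
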